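-- pv_equiv track=rewrite | github.com/AIFahim/neural-text-corrector | core/candidate_generator.py | generate_partial_variations
-- ===== SOURCE A (Python) =====
-- from typing import Set, Dict, Tuple, List, Optional
-- from itertools import combinations
--
-- def create_partial_text(term: str, positions_to_skip: Set[int]) -> str:
--     character_list = []
--     for character_position, character in enumerate(term):
--         if character_position not in positions_to_skip:
--             character_list.append(character)
--     return "".join(character_list)
--
-- def generate_partial_variations(term: str, characters_to_skip: int) -> Set[str]:
--     partial_variations = set()
--     character_positions = list(range(len(term)))
--     for skip_positions in combinations(character_positions, characters_to_skip):
--         skip_positions_set = set(skip_positions)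
--         partial_text = create_partial_text(term, skip_positions_set)
--         partial_variations.add(partial_text)
--     return partial_variations
-- ===== SOURCE B (Python) =====
-- def generate_partial_variations(term: str, characters_to_skip: int):
--     out = set()
--
--     def go(i, budget, prefix):
--         if budget < 0:
--             return
--         if i == len(term):
--             if budget == 0:
--                 out.add(prefix)
--             return
--         go(i + 1, budget - 1, prefix)          # skip term[i]
--         go(i + 1, budget, prefix + term[i])    # keep term[i]
--
--     go(0, characters_to_skip, "")
--     return out
-- ===== Notes on version B (the rewrite author's own statement) =====
-- stated objective: alternative
-- what changed: Replaces the itertools.combinations enumeration of skip-position tuples with a keep-or-skip recursion over the term that carries the prefix built so far and the remaining skip budget.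
import Mathlib
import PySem

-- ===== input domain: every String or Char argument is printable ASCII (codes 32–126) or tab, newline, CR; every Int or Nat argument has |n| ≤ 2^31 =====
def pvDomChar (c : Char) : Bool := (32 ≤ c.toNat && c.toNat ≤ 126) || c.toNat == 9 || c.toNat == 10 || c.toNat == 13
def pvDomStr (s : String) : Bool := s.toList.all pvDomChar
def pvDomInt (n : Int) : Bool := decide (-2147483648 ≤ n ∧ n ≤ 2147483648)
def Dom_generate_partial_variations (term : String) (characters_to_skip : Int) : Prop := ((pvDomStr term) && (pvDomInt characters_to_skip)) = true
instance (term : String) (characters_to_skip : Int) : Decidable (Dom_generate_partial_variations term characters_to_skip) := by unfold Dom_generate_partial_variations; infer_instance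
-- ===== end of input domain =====

-- B replaces the combinations enumeration with a keep-or-skip recursion over the term
-- carrying the prefix built so far and the remaining skip budget (objective: alternative).


-- ===== PORT A =====
-- itertools.combinations(xs, k): the tuples in the iterator's lexicographic order
def pvCombos (xs : List Nat) (k : Nat) : List (List Nat) :=
  match k, xs with
  | 0, _ => [[]]
  | _+1, [] => []
  | k+1, x :: rest => (pvCombos rest k).map (fun s => x :: s) ++ pvCombos rest (k+1)

-- the 'for character_position, character in enumerate(term)' loop, with its running index
def pvCpLoop (i : Nat) (cs : List Char) (skips : List Nat) : List Char :=
  match cs with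
  | [] => []
  | c :: rest => if i ∈ skips then pvCpLoop (i+1) rest skips else c :: pvCpLoop (i+1) rest skips

def create_partial_text (term : String) (positions_to_skip : List Nat) : String :=
  String.mk (pvCpLoop 0 term.toList positions_to_skip)

def generate_partial_variations (term : String) (characters_to_skip : Int) : List String :=
  let character_positions := List.range term.toList.length
  (pvCombos character_positions characters_to_skip.toNat).foldl
    (fun partial_variations skip_positions =>
      PySem.Set.add partial_variations (create_partial_text term skip_positions)) []

-- ===== PORT B =====
-- go(i, budget, prefix): first skip term[i], then keep it; collect into the set at the end
def pvAltGo (cs : List Char) (budget : Int) (pre : List Char) (out : PySem.Set String) : PySem.Set String :=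
  if budget < 0 then out
  else match cs with
  | [] => if budget = 0 then PySem.Set.add out (String.mk pre) else out
  | c :: rest => pvAltGo rest budget (pre ++ [c]) (pvAltGo rest (budget - 1) pre out)

def generate_partial_variations_alt (term : String) (characters_to_skip : Int) : List String :=
  pvAltGo term.toList characters_to_skip [] PySem.Set.empty

-- ===== PRECONDITION & SPEC =====
-- Pre_ excludes negative characters_to_skip, where A raises ValueError (from itertools.combinations); B returns the empty set there.
def Pre_generate_partial_variations (term : String) (characters_to_skip : Int) : Prop :=
  0 ≤ characters_to_skip
instance (term : String) (characters_to_skip : Int) : Decidable (Pre_generate_partial_variations term characters_to_skip) := by unfold Pre_generate_partial_variations; infer_instance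

def pvWitness_generate_partial_variations : String × Int := ("abc", 1)

def Spec_generate_partial_variations (term : String) (characters_to_skip : Int) (out : List String) : Prop := out = generate_partial_variations_alt term characters_to_skip
instance (term : String) (characters_to_skip : Int) (out : List String) : Decidable (Spec_generate_partial_variations term characters_to_skip out) := by unfold Spec_generate_partial_variations; infer_instance

-- ===== CLAIM (what is proved, stated in full; the proofs are below) =====
def Claim_equal_generate_partial_variations : Prop := ∀ (term : String) (characters_to_skip : Int), Dom_generate_partial_variations term characters_to_skip → Pre_generate_partial_variations term characters_to_skip → Spec_generate_partial_variations term characters_to_skip (generate_partial_variations term characters_to_skip)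

-- ===== LEMMAS AND PROOFS =====

-- the common enumeration: the strings both programs feed into their set, in order
def pvE (cs : List Char) (b : Nat) (pre : List Char) : List String :=
  match cs, b with
  | [], 0 => [String.mk pre]
  | [], _+1 => []
  | c :: rest, 0 => pvE rest 0 (pre ++ [c])
  | c :: rest, b+1 => pvE rest b pre ++ pvE rest (b+1) (pre ++ [c])

theorem pvAltGo_eq_foldl (cs : List Char) (n : Nat) (pre : List Char) (out : PySem.Set String) :
    pvAltGo cs (n : Int) pre out = (pvE cs n pre).foldl PySem.Set.add out := by
  induction cs generalizing n pre out with
  | nil =>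
    cases n with
    | zero => simp [pvAltGo, pvE]
    | succ m =>
      have h1 : ¬ ((m + 1 : Nat) : Int) < 0 := by omega
      have h2 : ¬ ((m + 1 : Nat) : Int) = 0 := by omega
      simp only [pvAltGo, pvE, if_neg h1, if_neg h2, List.foldl_nil]
  | cons c rest ih =>
    cases n with
    | zero =>
      have h1 : pvAltGo (c :: rest) ((0 : Nat) : Int) pre out
          = pvAltGo rest 0 (pre ++ [c]) (pvAltGo rest (-1) pre out) := by
        simp [pvAltGo]
      have h2 : pvAltGo rest (-1) pre out = out := by
        cases rest <;> simp [pvAltGo]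
      rw [h1, h2]
      have := ih 0 (pre ++ [c]) out
      simpa [pvE] using this
    | succ m =>
      have h1 : pvAltGo (c :: rest) ((m + 1 : Nat) : Int) pre out
          = pvAltGo rest ((m + 1 : Nat) : Int) (pre ++ [c]) (pvAltGo rest ((m : Nat) : Int) pre out) := by
        simp [pvAltGo]
        intro h
        omega
      rw [h1, ih, ih]
      simp [pvE, List.foldl_append]

theorem pvCpLoop_cons_lt (cs : List Char) (i j : Nat) (S : List Nat) (h : j < i) :
    pvCpLoop i cs (j :: S) = pvCpLoop i cs S := by
  induction cs generalizing i with
  | nil => simp [pvCpLoop]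
  | cons c rest ih =>
    have hne : i ≠ j := by omega
    simp [pvCpLoop, hne, ih (i+1) (by omega)]

theorem pvCombos_subset (xs : List Nat) (k : Nat) (S : List Nat) (hS : S ∈ pvCombos xs k) :
    ∀ a ∈ S, a ∈ xs := by
  induction xs generalizing k S with
  | nil =>
    cases k with
    | zero => simp [pvCombos] at hS; simp [hS]
    | succ m => simp [pvCombos] at hS
  | cons x rest ih =>
    cases k with
    | zero => simp [pvCombos] at hS; simp [hS]
    | succ m =>
      simp only [pvCombos, List.mem_append, List.mem_map] at hS
      rcases hS with ⟨T, hT, rfl⟩ | hS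
      · intro a ha
        rcases List.mem_cons.mp ha with rfl | ha
        · exact List.mem_cons_self
        · exact List.mem_cons_of_mem _ (ih m T hT a ha)
      · intro a ha
        exact List.mem_cons_of_mem _ (ih (m+1) S hS a ha)

theorem pvCombos_map_eq_pvE (cs : List Char) (k : Nat) (i : Nat) (pre : List Char) :
    (pvCombos (List.range' i cs.length) k).map
      (fun S => String.mk (pre ++ pvCpLoop i cs S)) = pvE cs k pre := by
  induction cs generalizing k i pre with
  | nil =>
    cases k with
    | zero => simp [pvCombos, pvE, pvCpLoop]
    | succ m => simp [pvCombos, pvE]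
  | cons c rest ih =>
    cases k with
    | zero =>
      have : pvCpLoop i (c :: rest) [] = c :: pvCpLoop (i+1) rest [] := by
        simp [pvCpLoop]
      simp only [pvCombos, List.map, this, pvE]
      rw [← ih 0 (i+1) (pre ++ [c])]
      simp [pvCombos]
    | succ m =>
      have hlen : (c :: rest).length = rest.length + 1 := rfl
      rw [hlen, List.range'_succ]
      simp only [pvCombos, List.map_append, List.map_map, pvE]
      congr 1
      · -- skip branch: positions starting with i
        rw [← ih m (i+1) pre]
        apply List.map_congr_left
        intro S _
        simp only [Function.comp_apply]
        have h1 : pvCpLoop i (c :: rest) (i :: S) = pvCpLoop (i+1) rest (i :: S) := by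
          simp [pvCpLoop]
        rw [h1, pvCpLoop_cons_lt rest (i+1) i S (by omega)]
      · -- keep branch: i not among the skipped positions
        rw [← ih (m+1) (i+1) (pre ++ [c])]
        apply List.map_congr_left
        intro S hS
        have hi : i ∉ S := by
          intro hmem
          have := pvCombos_subset _ _ _ hS i hmem
          have := List.mem_range'_1.mp this
          omega
        have h1 : pvCpLoop i (c :: rest) S = c :: pvCpLoop (i+1) rest S := by
          simp [pvCpLoop, hi]
        rw [h1]
        simp

-- ===== VERDICT (by name: the statement is the Claim_ definition above) =====
theorem generate_partial_variations_spec : Claim_equal_generate_partial_variations := by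
  intro term k _ hk
  unfold Spec_generate_partial_variations generate_partial_variations generate_partial_variations_alt
  obtain ⟨n, rfl⟩ : ∃ n : Nat, (n : Int) = k := ⟨k.toNat, Int.toNat_of_nonneg hk⟩
  rw [pvAltGo_eq_foldl]
  have hc : (n : Int).toNat = n := rfl
  rw [hc]
  rw [← pvCombos_map_eq_pvE term.toList n 0 []]
  rw [List.range_eq_range']
  rw [List.foldl_map]
  simp [create_partial_text, PySem.Set.empty]
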